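-- pv_equiv track=rewrite | github.com/arom0808/olympiads | temp_python/main.py | factorial_digit_sum
-- ===== SOURCE A (Python) =====
-- def dig_cnt(num: int):
--     res = 0
--     while num > 0:
--         res += num % 10
--         num //= 10
--     return res
--
-- def factorial_digit_sum(l, r):
--     if abs(l - r) <= 10:
--         num = l
--         for i in range(l + 1, r + 1):
--             num *= i
--         while num > 9:
--             num = dig_cnt(num)
--         return num
--     return 9
-- ===== SOURCE B (Python) =====
-- def factorial_digit_sum(l, r):
--     if abs(l - r) > 10:
--         return 9
--     num = l
--     i = r
--     while i > l:
--         num *= i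
--         i -= 1
--     return num if num <= 9 else 1 + (num - 1) % 9
-- ===== Notes on version B (the rewrite author's own statement) =====
-- stated objective: simpler
-- what changed: The repeated digit-sum-until-single-digit loop (with its dig_cnt helper) is replaced by the closed-form digital root 1 + (num - 1) % 9 applied only when num > 9, and the product is accumulated by a downward loop from r instead of an ascending range loop.
import Mathlib
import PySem

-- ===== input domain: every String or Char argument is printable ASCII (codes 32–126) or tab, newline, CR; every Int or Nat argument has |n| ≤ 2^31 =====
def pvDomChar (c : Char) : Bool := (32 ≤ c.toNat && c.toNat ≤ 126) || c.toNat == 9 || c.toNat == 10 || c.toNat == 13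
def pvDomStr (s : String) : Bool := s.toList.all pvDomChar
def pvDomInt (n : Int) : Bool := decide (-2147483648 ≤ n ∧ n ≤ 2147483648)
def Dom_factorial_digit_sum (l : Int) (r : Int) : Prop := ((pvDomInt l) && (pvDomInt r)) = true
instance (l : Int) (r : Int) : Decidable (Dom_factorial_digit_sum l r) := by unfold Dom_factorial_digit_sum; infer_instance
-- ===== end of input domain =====

-- B replaces A's repeated digit-sum reduction (and its dig_cnt helper) by the closed-form
-- digital root 1 + (num-1) % 9 and accumulates the product downward; objective: simpler.
-- (Loops are ported with a fuel argument that provably suffices, only to make them total.)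

-- ===== PORT A =====
-- dig_cnt: while num > 0: res += num % 10; num //= 10   (fuel num.toNat suffices: num shrinks)
def digCntGo : Nat → Int → Int → Int
  | 0, _, res => res
  | f + 1, num, res =>
    if num > 0 then digCntGo f (PySem.Int.floordiv num 10) (res + PySem.Int.mod num 10) else res

def dig_cnt (num : Int) : Int := digCntGo num.toNat num 0

-- while num > 9: num = dig_cnt(num)   (fuel num.toNat suffices: dig_cnt num < num there)
def reduceGo : Nat → Int → Int
  | 0, num => num
  | f + 1, num => if num > 9 then reduceGo f (dig_cnt num) else num

def factorial_digit_sum (l : Int) (r : Int) : Int :=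
  if |l - r| ≤ 10 then
    let num := (PySem.List.pyRange (l + 1) (r + 1) 1).foldl (fun num i => num * i) l
    reduceGo num.toNat num
  else 9

-- ===== PORT B =====
-- while i > l: num *= i; i -= 1   (fuel (i-l).toNat suffices: i-l shrinks by one)
def prodDownGo : Nat → Int → Int → Int → Int
  | 0, _, _, num => num
  | f + 1, l, i, num => if i > l then prodDownGo f l (i - 1) (num * i) else num

def factorial_digit_sum_alt (l : Int) (r : Int) : Int :=
  if |l - r| > 10 then 9
  else
    let num := prodDownGo (r - l).toNat l r l
    if num ≤ 9 then num else 1 + PySem.Int.mod (num - 1) 9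

-- ===== PRECONDITION & SPEC =====
def Spec_factorial_digit_sum (l : Int) (r : Int) (out : Int) : Prop := out = factorial_digit_sum_alt l r
instance (l : Int) (r : Int) (out : Int) : Decidable (Spec_factorial_digit_sum l r out) := by unfold Spec_factorial_digit_sum; infer_instance

-- ===== CLAIM (what is proved, stated in full; the proofs are below) =====
def Claim_equal_factorial_digit_sum : Prop := ∀ (l : Int) (r : Int), Dom_factorial_digit_sum l r → Spec_factorial_digit_sum l r (factorial_digit_sum l r)

-- ===== LEMMAS AND PROOFS =====

theorem digCntGo_nonpos (f : Nat) (num res : Int) (h : num ≤ 0) : digCntGo f num res = res := by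
  cases f with
  | zero => rfl
  | succ f => unfold digCntGo; rw [if_neg (by omega)]

theorem digCntGo_le (f : Nat) : ∀ (num res : Int), 0 ≤ num → digCntGo f num res ≤ num + res := by
  induction f with
  | zero => intro num res h; simp [digCntGo]; omega
  | succ f ih =>
    intro num res h
    unfold digCntGo
    split
    · rename_i hpos
      have hd : PySem.Int.floordiv num 10 = num / 10 := PySem.Int.floordiv_eq_ediv_of_pos (by omega)
      have hm : PySem.Int.mod num 10 = num % 10 := PySem.Int.mod_eq_emod_of_pos (by omega)
      have ih' := ih (num / 10) (res + num % 10) (by omega)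
      rw [hd, hm]
      omega
    · omega

theorem digCntGo_pos (f : Nat) : ∀ (num res : Int), 1 ≤ num → num.toNat ≤ f → res + 1 ≤ digCntGo f num res := by
  induction f with
  | zero => intro num res h hf; omega
  | succ f ih =>
    intro num res h hf
    unfold digCntGo
    rw [if_pos (by omega : num > 0)]
    have hd : PySem.Int.floordiv num 10 = num / 10 := PySem.Int.floordiv_eq_ediv_of_pos (by omega)
    have hm : PySem.Int.mod num 10 = num % 10 := PySem.Int.mod_eq_emod_of_pos (by omega)
    rw [hd, hm]
    by_cases hq : 1 ≤ num / 10
    · have := ih (num / 10) (res + num % 10) (by omega) (by omega)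
      omega
    · rw [digCntGo_nonpos f _ _ (by omega)]
      omega

theorem digCntGo_mod9 (f : Nat) : ∀ (num res : Int), 0 ≤ num → num.toNat ≤ f →
    digCntGo f num res % 9 = (num + res) % 9 := by
  induction f with
  | zero => intro num res h hf; simp [digCntGo]; omega
  | succ f ih =>
    intro num res h hf
    unfold digCntGo
    split
    · rename_i hpos
      have hd : PySem.Int.floordiv num 10 = num / 10 := PySem.Int.floordiv_eq_ediv_of_pos (by omega)
      have hm : PySem.Int.mod num 10 = num % 10 := PySem.Int.mod_eq_emod_of_pos (by omega)
      have := ih (num / 10) (res + num % 10) (by omega) (by omega)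
      rw [hd, hm]
      omega
    · omega

theorem dig_cnt_lt (num : Int) (h : 10 ≤ num) : dig_cnt num < num := by
  unfold dig_cnt
  obtain ⟨f, hf⟩ : ∃ f, num.toNat = f + 1 := ⟨num.toNat - 1, by omega⟩
  rw [hf]
  unfold digCntGo
  rw [if_pos (by omega : num > 0)]
  have hd : PySem.Int.floordiv num 10 = num / 10 := PySem.Int.floordiv_eq_ediv_of_pos (by omega)
  have hm : PySem.Int.mod num 10 = num % 10 := PySem.Int.mod_eq_emod_of_pos (by omega)
  rw [hd, hm]
  have := digCntGo_le f (num / 10) (0 + num % 10) (by omega)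
  omega

theorem reduceGo_closed (f : Nat) : ∀ (num : Int), num.toNat ≤ f →
    reduceGo f num = if num ≤ 9 then num else 1 + PySem.Int.mod (num - 1) 9 := by
  induction f with
  | zero => intro num hf; unfold reduceGo; rw [if_pos (by omega)]
  | succ f ih =>
    intro num hf
    unfold reduceGo
    split
    · rename_i hbig
      have hdlt := dig_cnt_lt num (by omega)
      have hdpos : (0:Int) + 1 ≤ dig_cnt num := digCntGo_pos num.toNat num 0 (by omega) le_rfl
      have hmod : dig_cnt num % 9 = (num + 0) % 9 := digCntGo_mod9 num.toNat num 0 (by omega) le_rfl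
      rw [ih (dig_cnt num) (by omega)]
      have hm1 : PySem.Int.mod (num - 1) 9 = (num - 1) % 9 := PySem.Int.mod_eq_emod_of_pos (by omega)
      have hm2 : PySem.Int.mod (dig_cnt num - 1) 9 = (dig_cnt num - 1) % 9 := PySem.Int.mod_eq_emod_of_pos (by omega)
      rw [hm1, hm2]
      split <;> omega
    · rw [if_pos (by omega : num ≤ 9)]

theorem foldl_mul_comm (xs : List Int) : ∀ (a c : Int),
    xs.foldl (fun num i => num * i) (a * c) = (xs.foldl (fun num i => num * i) a) * c := by
  induction xs with
  | nil => intro a c; rfl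
  | cons x xs ih =>
    intro a c
    simp only [List.foldl_cons]
    rw [show a * c * x = a * x * c by ring, ih]

theorem prodDownGo_eq (f : Nat) : ∀ (l r num : Int), (r - l).toNat ≤ f →
    prodDownGo f l r num = (PySem.List.pyRange (l + 1) (r + 1) 1).foldl (fun num i => num * i) num := by
  induction f with
  | zero =>
    intro l r num hf
    rw [PySem.List.pyRange_one_eq_nil (by omega : r + 1 ≤ l + 1)]
    rfl
  | succ f ih =>
    intro l r num hf
    unfold prodDownGo
    split
    · rename_i hgt
      rw [ih l (r - 1) (num * r) (by omega)]
      rw [PySem.List.pyRange_one_succ_right (by omega : l + 1 ≤ r)]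
      rw [List.foldl_append]
      simp only [List.foldl_cons, List.foldl_nil]
      rw [show r - 1 + 1 = r by ring, foldl_mul_comm]
    · rw [PySem.List.pyRange_one_eq_nil (by omega : r + 1 ≤ l + 1)]
      rfl

-- ===== VERDICT (by name: the statement is the Claim_ definition above) =====
theorem factorial_digit_sum_spec : Claim_equal_factorial_digit_sum := by
  intro l r _
  unfold Spec_factorial_digit_sum factorial_digit_sum factorial_digit_sum_alt
  by_cases h : |l - r| ≤ 10
  · rw [if_pos h, if_neg (by omega : ¬ |l - r| > 10), prodDownGo_eq _ _ _ _ le_rfl,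
      reduceGo_closed _ _ le_rfl]
  · rw [if_neg h, if_pos (by omega : |l - r| > 10)]
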